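-- pv_equiv track=rewrite | github.com/rccmodena/kattis_problems | problems/c/cudoviste/cudoviste.py | get_n_squashes_park
-- ===== SOURCE A (Python) =====
-- def has_building(park):
--     return '#' in park
--
-- def n_cars(park):
--     return park.count("X")
--
-- def get_park(r, c, map):
--     park = []
--     for i in range(r, r + 2):
--         for j in range(c, c + 2):
--             park.append(map[i][j])
--     return park
--
-- def get_n_squashes_park(r, c, map):
--     n_squashes_park = [0, 0, 0, 0, 0]
--     for i in range(r - 1):
--         for j in range(c - 1):
--             park = get_park(i, j, map)
--             if not has_building(park):
--                 n_squashes_park[n_cars(park)] += 1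
--
--     return n_squashes_park
-- ===== SOURCE B (Python) =====
-- def _prefix_row(prev, row, c, ch):
--     out = [0]
--     for j in range(c):
--         out.append(out[j] + prev[j + 1] - prev[j] + (1 if row[j] == ch else 0))
--     return out
--
-- def get_n_squashes_park(r, c, map):
--     n_squashes_park = [0, 0, 0, 0, 0]
--     if r - 1 <= 0 or c - 1 <= 0:
--         return n_squashes_park
--     zero = [0] * (c + 1)
--     tb = [zero]
--     tx = [zero]
--     pb = zero
--     px = zero
--     for i in range(r):
--         row = map[i]
--         pb = _prefix_row(pb, row, c, '#')
--         tb.append(pb)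
--         px = _prefix_row(px, row, c, 'X')
--         tx.append(px)
--     for i in range(r - 1):
--         bi0, bi2 = tb[i], tb[i + 2]
--         xi0, xi2 = tx[i], tx[i + 2]
--         for j in range(c - 1):
--             buildings = bi2[j + 2] - bi0[j + 2] - bi2[j] + bi0[j]
--             if buildings == 0:
--                 cars = xi2[j + 2] - xi0[j + 2] - xi2[j] + xi0[j]
--                 n_squashes_park[cars] += 1
--     return n_squashes_park
-- ===== Notes on version B (the rewrite author's own statement) =====
-- stated objective: alternative
-- what changed: B precomputes two 2-D prefix-sum tables (counts of '#' and 'X' cells) and answers each 2x2 window by inclusion-exclusion lookups, instead of A's re-scanning the 4 cells of every window via get_park.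
import Mathlib
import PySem

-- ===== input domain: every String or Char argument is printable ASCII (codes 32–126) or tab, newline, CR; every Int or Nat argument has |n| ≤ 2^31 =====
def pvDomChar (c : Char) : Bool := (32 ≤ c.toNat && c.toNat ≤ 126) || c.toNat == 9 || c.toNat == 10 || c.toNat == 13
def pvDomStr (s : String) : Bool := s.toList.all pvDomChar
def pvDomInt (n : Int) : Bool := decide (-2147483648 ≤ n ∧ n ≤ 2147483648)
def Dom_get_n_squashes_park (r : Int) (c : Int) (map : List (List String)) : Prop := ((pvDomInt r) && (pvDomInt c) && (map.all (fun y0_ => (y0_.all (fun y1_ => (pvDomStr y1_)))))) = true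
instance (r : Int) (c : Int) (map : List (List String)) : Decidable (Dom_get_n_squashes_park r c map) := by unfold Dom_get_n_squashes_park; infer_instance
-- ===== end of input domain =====

-- B replaces A's per-window 4-cell rescan (via get_park) by two 2-D prefix-sum tables
-- ('#' and 'X' counts) queried by inclusion-exclusion per window: a different algorithm
-- of the same asymptotic cost (objective: alternative).

-- Shared indexing helpers: Python's lst[i] / map[i][j] / row[j]. Each is the PySem
-- pyGet? primitive totalized with a default; exact wherever the Python indexes in range
-- (always the case under Pre_ — out of range Python raises IndexError, excluded by Pre_).
def pvAtI (lst : List Int) (k : Int) : Int := (PySem.List.pyGet? lst k).getD 0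
def pvStrAt (row : List String) (j : Int) : String := (PySem.List.pyGet? row j).getD ""
def pvRowAt (t : List (List Int)) (i : Int) : List Int := (PySem.List.pyGet? t i).getD []
def pvCell (map : List (List String)) (i j : Int) : String := pvStrAt ((PySem.List.pyGet? map i).getD []) j
-- Python's 'lst[k] += 1'; exact for 0 ≤ k < lst.length (here k is a count of 4 cells, lst has 5 slots)
def pvIncAt : List Int → Int → List Int
  | [], _ => []
  | x :: xs, k => if k = 0 then (x + 1) :: xs else x :: pvIncAt xs (k - 1)

-- ===== PORT A =====
def has_building (park : List String) : Bool := park.contains "#"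

def n_cars (park : List String) : Int := (PySem.List.count park "X" : Int)

def get_park (r : Int) (c : Int) (map : List (List String)) : List String :=
  (PySem.List.pyRange r (r + 2) 1).foldl (fun park i =>
    (PySem.List.pyRange c (c + 2) 1).foldl (fun park j =>
      park ++ [pvCell map i j]) park) []

def get_n_squashes_park (r : Int) (c : Int) (map : List (List String)) : List Int :=
  (PySem.List.pyRange 0 (r - 1) 1).foldl (fun acc i =>
    (PySem.List.pyRange 0 (c - 1) 1).foldl (fun acc j =>
      let park := get_park i j map
      if has_building park then acc else pvIncAt acc (n_cars park)) acc)
    [0, 0, 0, 0, 0]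

-- ===== PORT B =====
-- _prefix_row: extend a 2-D prefix-sum table (counts of cells == ch) by one grid row
def prefix_row (prev : List Int) (row : List String) (c : Int) (ch : String) : List Int :=
  (PySem.List.pyRange 0 c 1).foldl (fun out j =>
    out ++ [pvAtI out j + pvAtI prev (j + 1) - pvAtI prev j +
            (if pvStrAt row j == ch then 1 else 0)]) [0]

def get_n_squashes_park_alt (r : Int) (c : Int) (map : List (List String)) : List Int :=
  let res : List Int := [0, 0, 0, 0, 0]
  if r - 1 ≤ 0 ∨ c - 1 ≤ 0 then res
  else
    let zero : List Int := List.replicate (c + 1).toNat 0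
    let st := (PySem.List.pyRange 0 r 1).foldl
      (fun (st : List (List Int) × List Int × List (List Int) × List Int) i =>
        let row := (PySem.List.pyGet? map i).getD []
        let pb := prefix_row st.2.1 row c "#"
        let px := prefix_row st.2.2.2 row c "X"
        (st.1 ++ [pb], pb, st.2.2.1 ++ [px], px))
      ([zero], zero, [zero], zero)
    let tb := st.1
    let tx := st.2.2.1
    (PySem.List.pyRange 0 (r - 1) 1).foldl (fun acc i =>
      let bi0 := pvRowAt tb i
      let bi2 := pvRowAt tb (i + 2)
      let xi0 := pvRowAt tx i
      let xi2 := pvRowAt tx (i + 2)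
      (PySem.List.pyRange 0 (c - 1) 1).foldl (fun acc j =>
        let buildings := pvAtI bi2 (j + 2) - pvAtI bi0 (j + 2) - pvAtI bi2 j + pvAtI bi0 j
        if buildings = 0 then
          let cars := pvAtI xi2 (j + 2) - pvAtI xi0 (j + 2) - pvAtI xi2 j + pvAtI xi0 j
          pvIncAt acc cars
        else acc) acc) res

-- ===== PRECONDITION & SPEC =====
-- Pre_ excludes exactly the inputs where Python A raises IndexError: when r ≥ 2 and
-- c ≥ 2 it touches rows 0..r-1 and columns 0..c-1, so the grid must be that large.
def Pre_get_n_squashes_park (r : Int) (c : Int) (map : List (List String)) : Prop :=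
  2 ≤ r ∧ 2 ≤ c → r.toNat ≤ map.length ∧ ∀ row ∈ map.take r.toNat, c.toNat ≤ row.length
instance (r : Int) (c : Int) (map : List (List String)) : Decidable (Pre_get_n_squashes_park r c map) := by unfold Pre_get_n_squashes_park; infer_instance

def pvWitness_get_n_squashes_park : Int × Int × List (List String) :=
  (3, 2, [[".", "X"], ["#", "."], ["X", "X"]])

def Spec_get_n_squashes_park (r : Int) (c : Int) (map : List (List String)) (out : List Int) : Prop := out = get_n_squashes_park_alt r c map
instance (r : Int) (c : Int) (map : List (List String)) (out : List Int) : Decidable (Spec_get_n_squashes_park r c map out) := by unfold Spec_get_n_squashes_park; infer_instance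

-- ===== CLAIM (what is proved, stated in full; the proofs are below) =====
def Claim_equal_get_n_squashes_park : Prop := ∀ (r : Int) (c : Int) (map : List (List String)), Dom_get_n_squashes_park r c map → Pre_get_n_squashes_park r c map → Spec_get_n_squashes_park r c map (get_n_squashes_park r c map)

-- ===== LEMMAS AND PROOFS =====

-- proof-side abstractions: the indicator of one cell, a partial row sum, and the 2-D
-- prefix sum pvS that B's tables materialize
def pvInd (map : List (List String)) (ch : String) (x y : Nat) : Int :=
  if pvCell map (x : Int) (y : Int) == ch then 1 else 0

def pvRow (map : List (List String)) (ch : String) (x k : Nat) : Int :=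
  ((List.range k).map (fun y => pvInd map ch x y)).sum

def pvS (map : List (List String)) (ch : String) (i k : Nat) : Int :=
  ((List.range i).map (fun x => pvRow map ch x k)).sum

-- the i-th prefix-sum row that B's build loop produces
def pvPref (map : List (List String)) (c : Int) (ch : String) : Nat → List Int
  | 0 => List.replicate (c + 1).toNat 0
  | i + 1 => prefix_row (pvPref map c ch i) ((PySem.List.pyGet? map (i : Int)).getD []) c ch

lemma pvAtI_natCast (lst : List Int) (k : Nat) : pvAtI lst (k : Int) = lst.getD k 0 := by
  simp [pvAtI, List.getD_eq_getElem?_getD]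

lemma pv_foldl_app_len {α : Type} (g : List Int → α → Int) :
    ∀ (l : List α) (init : List Int),
      (List.foldl (fun out j => out ++ [g out j]) init l).length = init.length + l.length := by
  intro l
  induction l with
  | nil => intro init; simp
  | cons x xs ih => intro init; simp [List.foldl, ih]; omega

lemma pv_foldl_app_getD {α : Type} (g : List Int → α → Int) :
    ∀ (l : List α) (init : List Int) (k : Nat), k < init.length →
      (List.foldl (fun out j => out ++ [g out j]) init l).getD k 0 = init.getD k 0 := by
  intro l
  induction l with
  | nil => intro init k _; simp
  | cons x xs ih =>
      intro init k hk
      rw [List.foldl_cons, ih (init ++ [g init x]) k (by simp; omega)]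
      rw [List.getD_eq_getElem?_getD, List.getD_eq_getElem?_getD, List.getElem?_append_left hk]

lemma pv_prefix_row_len (prev : List Int) (row : List String) (ch : String) (n : Nat) :
    (prefix_row prev row (n : Int) ch).length = n + 1 := by
  unfold prefix_row
  rw [pv_foldl_app_len (fun out j => pvAtI out j + pvAtI prev (j + 1) - pvAtI prev j +
        (if pvStrAt row j == ch then 1 else 0))]
  simp [PySem.List.length_pyRange_one]
  omega

lemma pv_prefix_row_getD_zero (prev : List Int) (row : List String) (c : Int) (ch : String) :
    (prefix_row prev row c ch).getD 0 0 = 0 := by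
  unfold prefix_row
  rw [pv_foldl_app_getD (fun out j => pvAtI out j + pvAtI prev (j + 1) - pvAtI prev j +
        (if pvStrAt row j == ch then 1 else 0)) _ _ 0 (by simp)]
  rfl

lemma pv_prefix_row_char (prev : List Int) (row : List String) (ch : String)
    (h0 : prev.getD 0 0 = 0) :
    ∀ (n k : Nat), k ≤ n →
      (prefix_row prev row (n : Int) ch).getD k 0 =
        prev.getD k 0 + ((List.range k).map (fun (y : Nat) => if pvStrAt row (y : Int) == ch then (1 : Int) else 0)).sum := by
  intro n
  induction n with
  | zero =>
      intro k hk
      have hk0 : k = 0 := Nat.le_zero.mp hk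
      subst hk0
      unfold prefix_row
      rw [PySem.List.pyRange_one_eq_nil (by omega)]
      simpa using h0.symm
  | succ n ih =>
      intro k hk
      have hsplit : prefix_row prev row ((n + 1 : Nat) : Int) ch =
          (prefix_row prev row (n : Int) ch) ++
            [pvAtI (prefix_row prev row (n : Int) ch) (n : Int) + pvAtI prev ((n : Int) + 1) -
              pvAtI prev (n : Int) + (if pvStrAt row (n : Int) == ch then 1 else 0)] := by
        unfold prefix_row
        rw [show ((n + 1 : Nat) : Int) = (n : Int) + 1 by omega]
        rw [PySem.List.pyRange_one_succ_right (by positivity)]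
        rw [List.foldl_append]
        simp [List.foldl]
      rcases Nat.lt_or_ge k (n + 1) with hlt | hge
      · have hk' : k ≤ n := by omega
        rw [hsplit, List.getD_eq_getElem?_getD,
            List.getElem?_append_left (by rw [pv_prefix_row_len]; omega),
            ← List.getD_eq_getElem?_getD, ih k hk']
      · have hk1 : k = n + 1 := by omega
        subst hk1
        rw [hsplit, List.getD_eq_getElem?_getD]
        rw [List.getElem?_append_right (by rw [pv_prefix_row_len])]
        rw [pv_prefix_row_len]
        simp only [Nat.sub_self, List.getElem?_cons_zero, Option.getD_some]
        rw [pvAtI_natCast, ih n (le_refl n)]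
        rw [show ((n : Int) + 1) = ((n + 1 : Nat) : Int) by omega]
        rw [pvAtI_natCast, pvAtI_natCast]
        rw [List.range_succ]
        simp
        ring

lemma pv_getD_replicate (n k : Nat) : (List.replicate n (0 : Int)).getD k 0 = 0 := by
  rw [List.getD_eq_getElem?_getD, List.getElem?_replicate]
  split <;> simp

lemma pvPref_zero (map : List (List String)) (c : Int) (ch : String) (i : Nat) :
    (pvPref map c ch i).getD 0 0 = 0 := by
  cases i with
  | zero => exact pv_getD_replicate _ _
  | succ i => exact pv_prefix_row_getD_zero _ _ _ _

lemma pvPref_char (map : List (List String)) (c : Int) (ch : String) (hc : 0 ≤ c) :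
    ∀ (i k : Nat), k ≤ c.toNat → (pvPref map c ch i).getD k 0 = pvS map ch i k := by
  intro i
  induction i with
  | zero => intro k hk; simp [pvPref, pvS]
  | succ i ih =>
      intro k hk
      show (prefix_row (pvPref map c ch i) ((PySem.List.pyGet? map (i : Int)).getD []) c ch).getD k 0 = _
      have hcast : ((c.toNat : Nat) : Int) = c := Int.toNat_of_nonneg hc
      have hchar := pv_prefix_row_char (pvPref map c ch i)
        ((PySem.List.pyGet? map (i : Int)).getD []) ch (pvPref_zero map c ch i) c.toNat k hk
      rw [hcast] at hchar
      rw [hchar, ih k hk]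
      have hrow : ((List.range k).map (fun (y : Nat) =>
          if pvStrAt ((PySem.List.pyGet? map (i : Int)).getD []) (y : Int) == ch then (1 : Int) else 0)).sum
          = pvRow map ch i k := by
        simp [pvRow, pvInd, pvCell]
      rw [hrow]
      simp [pvS, List.range_succ]

lemma pvS_succ (map : List (List String)) (ch : String) (i k : Nat) :
    pvS map ch (i + 1) k = pvS map ch i k + pvRow map ch i k := by
  simp [pvS, List.range_succ]

lemma pvRow_succ (map : List (List String)) (ch : String) (x k : Nat) :
    pvRow map ch x (k + 1) = pvRow map ch x k + pvInd map ch x k := by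
  simp [pvRow, List.range_succ]

lemma pvS_window (map : List (List String)) (ch : String) (a k : Nat) :
    pvS map ch (a + 2) (k + 2) - pvS map ch a (k + 2) - pvS map ch (a + 2) k + pvS map ch a k =
      pvInd map ch a k + pvInd map ch a (k + 1) + pvInd map ch (a + 1) k + pvInd map ch (a + 1) (k + 1) := by
  have e2 : ∀ j, pvS map ch (a + 2) j = pvS map ch a j + pvRow map ch a j + pvRow map ch (a + 1) j := by
    intro j
    rw [show a + 2 = (a + 1) + 1 by omega, pvS_succ, pvS_succ]
  have r2 : ∀ x, pvRow map ch x (k + 2) = pvRow map ch x k + pvInd map ch x k + pvInd map ch x (k + 1) := by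
    intro x
    rw [show k + 2 = (k + 1) + 1 by omega, pvRow_succ, pvRow_succ]
  rw [e2, e2, r2, r2]
  ring

lemma pv_build (map : List (List String)) (c : Int) (m : Nat) :
    (PySem.List.pyRange 0 (m : Int) 1).foldl
      (fun (st : List (List Int) × List Int × List (List Int) × List Int) i =>
        (st.1 ++ [prefix_row st.2.1 ((PySem.List.pyGet? map i).getD []) c "#"],
         prefix_row st.2.1 ((PySem.List.pyGet? map i).getD []) c "#",
         st.2.2.1 ++ [prefix_row st.2.2.2 ((PySem.List.pyGet? map i).getD []) c "X"],
         prefix_row st.2.2.2 ((PySem.List.pyGet? map i).getD []) c "X"))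
      ([List.replicate (c + 1).toNat 0], List.replicate (c + 1).toNat 0,
       [List.replicate (c + 1).toNat 0], List.replicate (c + 1).toNat 0) =
    ((List.range (m + 1)).map (pvPref map c "#"), pvPref map c "#" m,
     (List.range (m + 1)).map (pvPref map c "X"), pvPref map c "X" m) := by
  induction m with
  | zero =>
      rw [PySem.List.pyRange_one_eq_nil (by omega)]
      simp [pvPref]
  | succ m ih =>
      rw [show ((m + 1 : Nat) : Int) = (m : Int) + 1 by omega]
      rw [PySem.List.pyRange_one_succ_right (by positivity), List.foldl_append, ih]
      simp [List.foldl, pvPref, List.range_succ]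

lemma pv_row_tb (f : Nat → List Int) (R : Nat) (i : Int) (h0 : 0 ≤ i) (h : i ≤ (R : Int)) :
    pvRowAt ((List.range (R + 1)).map f) i = f i.toNat := by
  obtain ⟨n, rfl⟩ : ∃ n : Nat, i = (n : Int) := ⟨i.toNat, (Int.toNat_of_nonneg h0).symm⟩
  have hR : n < R + 1 := by omega
  simp [pvRowAt, hR]

lemma pv_at_pref (map : List (List String)) (c : Int) (ch : String) (hc : 0 ≤ c) (i : Nat)
    (j : Int) (h0 : 0 ≤ j) (hC : j ≤ c) :
    pvAtI (pvPref map c ch i) j = pvS map ch i j.toNat := by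
  obtain ⟨n, rfl⟩ : ∃ n : Nat, j = (n : Int) := ⟨j.toNat, (Int.toNat_of_nonneg h0).symm⟩
  rw [pvAtI_natCast]
  have := pvPref_char map c ch hc i n (by omega)
  simpa using this

lemma pv_get_park (i j : Int) (map : List (List String)) :
    get_park i j map = [pvCell map i j, pvCell map i (j + 1), pvCell map (i + 1) j, pvCell map (i + 1) (j + 1)] := by
  have h2 : ∀ (x : Int), PySem.List.pyRange x (x + 2) 1 = [x, x + 1] := by
    intro x
    rw [PySem.List.pyRange_one_cons (by omega)]
    rw [show x + 2 = (x + 1) + 1 by ring, PySem.List.pyRange_one_singleton]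
  unfold get_park
  simp [h2, List.foldl]

lemma pv_count4 (c0 c1 c2 c3 : String) :
    n_cars [c0, c1, c2, c3] =
      (if c0 == "X" then (1 : Int) else 0) + (if c1 == "X" then (1 : Int) else 0) +
      (if c2 == "X" then (1 : Int) else 0) + (if c3 == "X" then (1 : Int) else 0) := by
  by_cases h0 : c0 = "X" <;> by_cases h1 : c1 = "X" <;> by_cases h2 : c2 = "X" <;>
    by_cases h3 : c3 = "X" <;>
      simp [n_cars, PySem.List.count_eq, h0, h1, h2, h3]

lemma pv_body (c00 c01 c10 c11 : String) (acc : List Int) :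
    (if has_building [c00, c01, c10, c11] then acc
     else pvIncAt acc (n_cars [c00, c01, c10, c11])) =
    (if ((if c00 == "#" then (1 : Int) else 0) + (if c01 == "#" then (1 : Int) else 0) +
         (if c10 == "#" then (1 : Int) else 0) + (if c11 == "#" then (1 : Int) else 0)) = 0 then
       pvIncAt acc ((if c00 == "X" then (1 : Int) else 0) + (if c01 == "X" then (1 : Int) else 0) +
                    (if c10 == "X" then (1 : Int) else 0) + (if c11 == "X" then (1 : Int) else 0))
     else acc) := by
  rw [pv_count4]
  by_cases h0 : c00 = "#" <;> by_cases h1 : c01 = "#" <;> by_cases h2 : c10 = "#" <;>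
    by_cases h3 : c11 = "#" <;> simp_all [has_building] <;>
      (intro h; rcases h with h | h | h | h <;> exact absurd h.symm (by assumption))

lemma pv_foldl_id (l : List Int) (init : List Int) :
    List.foldl (fun (acc : List Int) (_ : Int) => acc) init l = init := by
  induction l generalizing init with
  | nil => rfl
  | cons x xs ih => simp [List.foldl, ih]

theorem pv_main (r : Int) (c : Int) (map : List (List String)) :
    get_n_squashes_park r c map = get_n_squashes_park_alt r c map := by
  by_cases hdeg : r - 1 ≤ 0 ∨ c - 1 ≤ 0
  · unfold get_n_squashes_park get_n_squashes_park_alt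
    rw [if_pos hdeg]
    rcases hdeg with h | h
    · rw [show PySem.List.pyRange 0 (r - 1) 1 = ([] : List Int) from
          PySem.List.pyRange_one_eq_nil (by omega)]
      rfl
    · have hin : PySem.List.pyRange 0 (c - 1) 1 = ([] : List Int) :=
        PySem.List.pyRange_one_eq_nil (by omega)
      simp only [hin, List.foldl_nil]
      exact pv_foldl_id _ _
  · have hr : 2 ≤ r := by omega
    have hc : 2 ≤ c := by omega
    have hrR : ((r.toNat : Nat) : Int) = r := Int.toNat_of_nonneg (by omega)
    unfold get_n_squashes_park get_n_squashes_park_alt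
    dsimp only
    rw [if_neg (show ¬(r - 1 ≤ 0 ∨ c - 1 ≤ 0) by omega)]
    have hbuild := pv_build map c r.toNat
    rw [hrR] at hbuild
    simp only [hbuild]
    apply PySem.List.foldl_congr_mem
    intro acc i hi
    rw [PySem.List.mem_pyRange_one] at hi
    obtain ⟨hi0, hi1⟩ := hi
    have hiub : i + 2 ≤ (r.toNat : Int) := by omega
    rw [pv_row_tb _ _ i hi0 (by omega), pv_row_tb _ _ (i + 2) (by omega) hiub,
        pv_row_tb _ _ i hi0 (by omega), pv_row_tb _ _ (i + 2) (by omega) hiub]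
    apply PySem.List.foldl_congr_mem
    intro acc2 j hj
    rw [PySem.List.mem_pyRange_one] at hj
    obtain ⟨hj0, hj1⟩ := hj
    have hc0 : (0 : Int) ≤ c := by omega
    rw [pv_at_pref map c "#" hc0 _ (j + 2) (by omega) (by omega),
        pv_at_pref map c "#" hc0 _ (j + 2) (by omega) (by omega),
        pv_at_pref map c "#" hc0 _ j hj0 (by omega),
        pv_at_pref map c "#" hc0 _ j hj0 (by omega),
        pv_at_pref map c "X" hc0 _ (j + 2) (by omega) (by omega),
        pv_at_pref map c "X" hc0 _ (j + 2) (by omega) (by omega),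
        pv_at_pref map c "X" hc0 _ j hj0 (by omega),
        pv_at_pref map c "X" hc0 _ j hj0 (by omega)]
    have hi2 : (i + 2).toNat = i.toNat + 2 := by omega
    have hj2 : (j + 2).toNat = j.toNat + 2 := by omega
    rw [hi2, hj2]
    rw [pvS_window, pvS_window]
    rw [pv_get_park]
    have hic : ((i.toNat : Nat) : Int) = i := Int.toNat_of_nonneg hi0
    have hjc : ((j.toNat : Nat) : Int) = j := Int.toNat_of_nonneg hj0
    simp only [pvInd, Nat.cast_add, Nat.cast_one, hic, hjc]
    exact pv_body _ _ _ _ acc2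

-- ===== VERDICT (by name: the statement is the Claim_ definition above) =====
theorem get_n_squashes_park_spec : Claim_equal_get_n_squashes_park := by
  intro r c map _ _
  unfold Spec_get_n_squashes_park
  exact pv_main r c map
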